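-- pv_equiv track=rewrite | github.com/navikt/ep-meta-analyse | lib/commit_data.py | intention_from_message
-- ===== SOURCE A (Python) =====
-- intentions = {
--     'F': "feature",
--     'R': "refactoring",
--     'T': "tests only",
--     'B': "bugfix",
--     'E': "environment",
--     'D': "documentation",
--     'P': "process (build/deploy)",
--     'A': "automated formatting etc",
--     'U': "dependency update",
--     '*': "unknown"
-- }
--
-- def intention_from_message(message):
--     if message.startswith("[Release Plugin]"):
--         return "P"
--     if message.lower().startswith("e oppgraderer"):
--         return "U"
--     if message.startswith("Revert \""):
--         return intention_from_message(message[len("Revert \""):])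
--     if (len(message) >= 3 and message[1:3] in (" -", "!!", "**")) or (len(message) >= 2 and message[1] == " "):  # last condition handles old messages
--         return message[0].upper() if message[0].upper() in intentions.keys() else "*"
--     return "*"
-- ===== SOURCE B (Python) =====
-- _CODES = "FRTBEDPAU*"
--
-- def intention_from_message(message):
--     # Iteratively peel 'Revert "' prefixes instead of recursing; re-check all
--     # guards each round, then classify the fully stripped message once.
--     while True:
--         if message.startswith("[Release Plugin]"):
--             return "P"
--         if message.lower().startswith("e oppgraderer"):
--             return "U"
--         if message.startswith('Revert "'):
--             message = message[8:]
--             continue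
--         break
--     if len(message) >= 2 and (message[1] == " " or (len(message) >= 3 and message[1:3] in (" -", "!!", "**"))):
--         c = message[0].upper()
--         return c if c in _CODES else "*"
--     return "*"
-- ===== Notes on version B (the rewrite author's own statement) =====
-- stated objective: idiomatic
-- what changed: Replaced the tail recursion with an explicit while-loop that peels revert prefixes (re-checking the early-return guards each round) followed by a single final classification step with a flattened guard and a string membership test.
import Mathlib
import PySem

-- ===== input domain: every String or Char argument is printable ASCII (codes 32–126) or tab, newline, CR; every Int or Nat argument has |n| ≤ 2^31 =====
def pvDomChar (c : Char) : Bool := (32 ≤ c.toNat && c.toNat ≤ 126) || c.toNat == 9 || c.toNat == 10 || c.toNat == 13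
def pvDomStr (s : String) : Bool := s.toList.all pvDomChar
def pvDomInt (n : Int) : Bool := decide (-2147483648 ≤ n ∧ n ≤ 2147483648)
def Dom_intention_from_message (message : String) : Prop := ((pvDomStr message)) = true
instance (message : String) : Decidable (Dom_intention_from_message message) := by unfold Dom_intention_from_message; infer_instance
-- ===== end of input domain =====

-- B replaces A's tail recursion by an explicit strip-loop followed by a single
-- final classification step (objective: simpler/idiomatic decomposition).

-- ===== PORT A =====
-- the keys of the `intentions` dict, as one-character strings (List Char)
def pvKeys : List (List Char) :=
  [['F'], ['R'], ['T'], ['B'], ['E'], ['D'], ['P'], ['A'], ['U'], ['*']]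

-- A works on the string's characters; message[8:] = drop 8, message[1:3] = (drop 1).take 2
def intention_core (cs : List Char) : String :=
  if PySem.Chars.startswith cs "[Release Plugin]".toList then "P"
  else if PySem.Chars.startswith (PySem.Chars.lower cs) "e oppgraderer".toList then "U"
  else if h : PySem.Chars.startswith cs "Revert \"".toList then
    intention_core (cs.drop 8)
  else if (3 ≤ cs.length ∧ (cs.drop 1).take 2 ∈ [" -".toList, "!!".toList, "**".toList])
        ∨ (2 ≤ cs.length ∧ cs[1]? = some ' ') then
    -- message[0].upper() = upper of the one-character prefix
    if PySem.Chars.upper (cs.take 1) ∈ pvKeys then String.ofList (PySem.Chars.upper (cs.take 1)) else "*"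
  else "*"
termination_by cs.length
decreasing_by
  have hp := (PySem.Chars.startswith_iff cs ("Revert \"".toList)).mp h
  have : ("Revert \"".toList).length ≤ cs.length := hp.length_le
  simp only [List.length_drop]
  simp at this
  omega

def intention_from_message (message : String) : String :=
  intention_core message.toList

-- ===== PORT B =====
def pvCodes : List Char := "FRTBEDPAU*".toList

-- the `while True` loop: either an early return (.inl) or the stripped message (.inr)
def altLoop (cs : List Char) : String ⊕ List Char :=
  if PySem.Chars.startswith cs "[Release Plugin]".toList then .inl "P"
  else if PySem.Chars.startswith (PySem.Chars.lower cs) "e oppgraderer".toList then .inl "U"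
  else if h : PySem.Chars.startswith cs "Revert \"".toList then
    altLoop (cs.drop 8)
  else .inr cs
termination_by cs.length
decreasing_by
  have hp := (PySem.Chars.startswith_iff cs ("Revert \"".toList)).mp h
  have : ("Revert \"".toList).length ≤ cs.length := hp.length_le
  simp only [List.length_drop]
  simp at this
  omega

-- the classification after the loop has broken out
def altClassify (cs : List Char) : String :=
  if 2 ≤ cs.length ∧ (cs[1]? = some ' '
      ∨ (3 ≤ cs.length ∧ (cs.drop 1).take 2 ∈ [" -".toList, "!!".toList, "**".toList])) then
    let c := PySem.Chars.upper (cs.take 1)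
    if PySem.Chars.isIn c pvCodes then String.ofList c else "*"
  else "*"

def intention_from_message_alt (message : String) : String :=
  match altLoop message.toList with
  | .inl r => r
  | .inr cs => altClassify cs

-- ===== PRECONDITION & SPEC =====
def Spec_intention_from_message (message : String) (out : String) : Prop := out = intention_from_message_alt message
instance (message : String) (out : String) : Decidable (Spec_intention_from_message message out) := by unfold Spec_intention_from_message; infer_instance

-- ===== CLAIM (what is proved, stated in full; the proofs are below) =====
def Claim_equal_intention_from_message : Prop := ∀ (message : String), Dom_intention_from_message message → Spec_intention_from_message message (intention_from_message message)

-- ===== LEMMAS AND PROOFS =====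

theorem singleton_infix_iff (c : Char) (l : List Char) : [c] <:+: l ↔ c ∈ l := by
  constructor
  · intro h
    exact h.subset (List.mem_singleton_self c)
  · intro h
    obtain ⟨s, t, rfl⟩ := List.append_of_mem h
    exact ⟨s, t, by simp⟩

theorem classify_eq (cs : List Char) :
    (if (3 ≤ cs.length ∧ (cs.drop 1).take 2 ∈ [" -".toList, "!!".toList, "**".toList])
        ∨ (2 ≤ cs.length ∧ cs[1]? = some ' ') then
      if PySem.Chars.upper (cs.take 1) ∈ pvKeys then String.ofList (PySem.Chars.upper (cs.take 1)) else "*"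
    else "*") = altClassify cs := by
  unfold altClassify
  by_cases hc : (3 ≤ cs.length ∧ (cs.drop 1).take 2 ∈ [" -".toList, "!!".toList, "**".toList])
      ∨ (2 ≤ cs.length ∧ cs[1]? = some ' ')
  · have hc' : 2 ≤ cs.length ∧ (cs[1]? = some ' '
        ∨ (3 ≤ cs.length ∧ (cs.drop 1).take 2 ∈ [" -".toList, "!!".toList, "**".toList])) := by
      rcases hc with ⟨h3, hm⟩ | ⟨h2, hsp⟩
      · exact ⟨by omega, Or.inr ⟨h3, hm⟩⟩
      · exact ⟨h2, Or.inl hsp⟩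
    rw [if_pos hc, if_pos hc']
    -- 2 ≤ length : cs has a head
    obtain ⟨a, rest, rfl⟩ : ∃ a rest, cs = a :: rest := by
      cases cs with
      | nil => simp at hc'
      | cons a rest => exact ⟨a, rest, rfl⟩
    have hmem : (PySem.Chars.upper [a] ∈ pvKeys) ↔
        PySem.Chars.isIn (PySem.Chars.upper [a]) pvCodes = true := by
      have hu : ∃ u, PySem.Chars.upper [a] = [u] := by
        simp [PySem.Chars.upper]
      obtain ⟨u, hu⟩ := hu
      rw [hu, PySem.Chars.isIn_iff_infix, singleton_infix_iff]
      simp [pvKeys, pvCodes]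
    simp only [List.take_succ_cons, List.take_zero] at *
    by_cases hk : PySem.Chars.upper [a] ∈ pvKeys
    · rw [if_pos hk, if_pos (hmem.mp hk)]
    · rw [if_neg hk, if_neg (by simpa using (hmem.not.mp hk))]
  · have hc' : ¬ (2 ≤ cs.length ∧ (cs[1]? = some ' '
        ∨ (3 ≤ cs.length ∧ (cs.drop 1).take 2 ∈ [" -".toList, "!!".toList, "**".toList]))) := by
      rw [not_or] at hc
      rintro ⟨h2, h | h⟩
      · exact hc.2 ⟨h2, h⟩
      · exact hc.1 h
    rw [if_neg hc, if_neg hc']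

theorem core_eq_alt (cs : List Char) :
    intention_core cs = (match altLoop cs with
      | .inl r => r
      | .inr cs' => altClassify cs') := by
  fun_induction intention_core cs with
  | case1 cs h => rw [altLoop, if_pos h]
  | case2 cs h1 h2 => rw [altLoop, if_neg h1, if_pos h2]
  | case3 cs h1 h2 h3 ih =>
      rw [altLoop, if_neg h1, if_neg h2, dif_pos h3]
      exact ih
  | case4 cs h1 h2 h3 h4 h5 =>
      rw [altLoop, if_neg h1, if_neg h2, dif_neg h3]
      have hce := classify_eq cs
      rw [if_pos h4, if_pos h5] at hce
      exact hce
  | case5 cs h1 h2 h3 h4 h5 =>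
      rw [altLoop, if_neg h1, if_neg h2, dif_neg h3]
      have hce := classify_eq cs
      rw [if_pos h4, if_neg h5] at hce
      exact hce
  | case6 cs h1 h2 h3 h4 =>
      rw [altLoop, if_neg h1, if_neg h2, dif_neg h3]
      have hce := classify_eq cs
      rw [if_neg h4] at hce
      exact hce

-- ===== VERDICT (by name: the statement is the Claim_ definition above) =====
theorem intention_from_message_spec : Claim_equal_intention_from_message := by
  intro message _
  unfold Spec_intention_from_message intention_from_message intention_from_message_alt
  exact core_eq_alt message.toList
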